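-- pv_equiv track=rewrite | github.com/drugform/uniqsar | data/utils.py | choose_biggest_smiles
-- ===== SOURCE A (Python) =====
-- def choose_biggest_smiles(smiles, smiles_list):
--     if '.' in smiles:
--         mol_list = smiles.split('.')
--         biggest_smiles = sorted({smi: len(smi) for smi
--                                  in mol_list}.items(),
--                                 key=lambda x: x[1], reverse=True)[0][0]
--     else:
--         biggest_smiles = smiles
--     if (biggest_smiles in smiles_list) & \
--        (biggest_smiles != smiles):
--         biggest_smiles = None
--     return biggest_smiles
-- ===== SOURCE B (Python) =====
-- def choose_biggest_smiles(smiles, smiles_list):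
--     # One left-to-right scan over the characters: keep the current fragment and
--     # the first longest fragment seen so far; no split list, no dict, no sort,
--     # and no special case for dot-free input (the whole string is then the only
--     # fragment, so the guard below can never fire for it).
--     best = cur = ''
--     for ch in smiles:
--         if ch == '.':
--             if len(cur) > len(best):
--                 best = cur
--             cur = ''
--         else:
--             cur += ch
--     if len(cur) > len(best):
--         best = cur
--     return None if best in smiles_list and best != smiles else best
-- ===== Notes on version B (the rewrite author's own statement) =====
-- stated objective: simpler
-- what changed: Replaced split('.') plus dict-dedup plus stable descending sort plus [0][0] (and the dot/no-dot branch) with one left-to-right character scan that keeps the current fragment and the first longest fragment seen so far.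
import Mathlib
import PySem

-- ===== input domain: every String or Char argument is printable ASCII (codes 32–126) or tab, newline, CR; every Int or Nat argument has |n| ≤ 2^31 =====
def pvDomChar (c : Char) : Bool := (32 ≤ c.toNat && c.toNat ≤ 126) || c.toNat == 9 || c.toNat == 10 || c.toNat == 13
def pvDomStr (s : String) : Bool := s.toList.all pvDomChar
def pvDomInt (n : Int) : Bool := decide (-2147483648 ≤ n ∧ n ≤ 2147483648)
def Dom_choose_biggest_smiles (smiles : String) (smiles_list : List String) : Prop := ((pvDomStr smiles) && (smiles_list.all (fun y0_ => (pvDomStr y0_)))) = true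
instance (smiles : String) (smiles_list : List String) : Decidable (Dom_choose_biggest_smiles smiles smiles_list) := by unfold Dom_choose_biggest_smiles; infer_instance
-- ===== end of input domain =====

-- B replaces A's split + dict-dedup + stable descending sort + [0][0] (and its dot/no-dot branch)
-- by one character scan keeping the current fragment and the first longest fragment (objective: simpler).

-- ===== PORT A =====
def choose_biggest_smiles (smiles : String) (smiles_list : List String) : Option String :=
  let biggest : String :=
    if PySem.Str.isIn "." smiles then
      -- mol_list = smiles.split('.')  (sep "." ≠ "", so split? is always some; exact)
      let mol_list := (PySem.Str.split? smiles ".").getD []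
      -- {smi: len(smi) for smi in mol_list}
      let d : PySem.Dict String Int :=
        mol_list.foldl (fun d smi => d.insert smi (PySem.Str.len smi : Int)) PySem.Dict.empty
      -- sorted(d.items(), key=lambda x: x[1], reverse=True)[0][0]
      match PySem.List.sorted d.items (fun x => x.2) true with
      | [] => ""          -- unreachable: split('.') always yields at least one fragment
      | p :: _ => p.1
    else smiles
  -- if (biggest_smiles in smiles_list) & (biggest_smiles != smiles): biggest_smiles = None
  if smiles_list.contains biggest && biggest != smiles then none else some biggest

-- ===== PORT B =====
def choose_biggest_smiles_alt (smiles : String) (smiles_list : List String) : Option String :=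
  -- for ch in smiles: accumulate cur, flush on '.', keeping the first longest fragment
  -- (strings handled as their character lists; exact on every input)
  let st := smiles.toList.foldl
    (fun (p : List Char × List Char) ch =>
      if ch == '.' then
        (if p.2.length > p.1.length then p.2 else p.1, [])
      else
        (p.1, p.2 ++ [ch]))
    ([], [])
  -- final flush: if len(cur) > len(best): best = cur
  let best := String.ofList (if st.2.length > st.1.length then st.2 else st.1)
  -- return None if best in smiles_list and best != smiles else best
  if smiles_list.contains best && best != smiles then none else some best

-- ===== PRECONDITION & SPEC =====
def Spec_choose_biggest_smiles (smiles : String) (smiles_list : List String) (out : Option String) : Prop := out = choose_biggest_smiles_alt smiles smiles_list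
instance (smiles : String) (smiles_list : List String) (out : Option String) : Decidable (Spec_choose_biggest_smiles smiles smiles_list out) := by unfold Spec_choose_biggest_smiles; infer_instance

-- ===== CLAIM (what is proved, stated in full; the proofs are below) =====
def Claim_equal_choose_biggest_smiles : Prop := ∀ (smiles : String) (smiles_list : List String), Dom_choose_biggest_smiles smiles smiles_list → Spec_choose_biggest_smiles smiles smiles_list (choose_biggest_smiles smiles smiles_list)

-- ===== LEMMAS AND PROOFS =====

-- the fragments of a char list split on '.', by structural recursion
def pvF : List Char → List (List Char)
  | [] => [[]]
  | c :: cs => if c = '.' then [] :: pvF cs else (c :: (pvF cs).headI) :: (pvF cs).tail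

-- apply g to the head fragment only
def pvMapHead (g : List Char → List Char) : List (List Char) → List (List Char)
  | [] => []
  | h :: t => g h :: t

-- Python's "keep the later fragment only if strictly longer"
def pvChooser (b f : List Char) : List Char := if f.length > b.length then f else b

theorem pvF_ne_nil (cs : List Char) : pvF cs ≠ [] := by
  cases cs with
  | nil => simp [pvF]
  | cons c cs => simp only [pvF]; split <;> simp

theorem pv_go_eq (fuel : Nat) : ∀ (l cur : List Char) (accs : List (List Char)),
    l.length < fuel →
    PySem.Chars.splitOn.go ['.'] fuel l cur accs =
      accs.reverse ++ pvMapHead (cur.reverse ++ ·) (pvF l) := by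
  induction fuel with
  | zero => intro l cur accs h; omega
  | succ f ih =>
    intro l cur accs h
    cases l with
    | nil =>
      simp [PySem.Chars.splitOn.go, pvF, pvMapHead]
    | cons c rest =>
      rw [PySem.Chars.splitOn.go]
      by_cases hc : c = '.'
      · subst hc
        have hp : List.isPrefixOf ['.'] ('.' :: rest) = true := by
          simp [List.isPrefixOf]
        rw [if_pos hp]
        simp only [List.length_cons, List.drop_succ_cons, List.length_nil, List.drop_zero]
        rw [ih rest [] (cur.reverse :: accs) (by simpa using Nat.lt_of_succ_lt_succ h)]
        cases hF : pvF rest with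
        | nil => exact absurd hF (pvF_ne_nil rest)
        | cons hh tt => simp [pvF, hF, pvMapHead]
      · have hp : List.isPrefixOf ['.'] (c :: rest) = false := by
          simp only [List.isPrefixOf, Bool.and_true, beq_eq_false_iff_ne, ne_eq]
          exact fun hq => hc hq.symm
        rw [if_neg (by simp [hp])]
        rw [ih rest (c :: cur) accs (by simpa using Nat.lt_of_succ_lt_succ h)]
        have hne : pvF rest ≠ [] := pvF_ne_nil rest
        cases hF : pvF rest with
        | nil => exact absurd hF hne
        | cons hh tt =>
          simp [pvF, hc, hF, pvMapHead, List.headI]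

theorem pv_splitOn_dot (cs : List Char) : PySem.Chars.splitOn cs ['.'] = pvF cs := by
  rw [PySem.Chars.splitOn, pv_go_eq (cs.length + 1) cs [] [] (by omega)]
  cases hF : pvF cs with
  | nil => exact absurd hF (pvF_ne_nil cs)
  | cons h t => simp [pvMapHead]

theorem pv_split?_dot (s : String) :
    PySem.Str.split? s "." = some ((pvF s.toList).map String.ofList) := by
  rw [PySem.Str.split?]
  have : PySem.Chars.split? s.toList ".".toList = some (pvF s.toList) := by
    rw [PySem.Chars.split?]
    simp [pv_splitOn_dot]
  rw [this]
  rfl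

-- the scan of port B over the characters computes the fold of pvChooser over the fragments
theorem pv_scan : ∀ (cs best cur : List Char),
    (if (cs.foldl
          (fun (p : List Char × List Char) ch =>
            if ch == '.' then
              (if p.2.length > p.1.length then p.2 else p.1, [])
            else
              (p.1, p.2 ++ [ch])) (best, cur)).2.length >
        (cs.foldl
          (fun (p : List Char × List Char) ch =>
            if ch == '.' then
              (if p.2.length > p.1.length then p.2 else p.1, [])
            else
              (p.1, p.2 ++ [ch])) (best, cur)).1.length
      then (cs.foldl
          (fun (p : List Char × List Char) ch =>
            if ch == '.' then
              (if p.2.length > p.1.length then p.2 else p.1, [])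
            else
              (p.1, p.2 ++ [ch])) (best, cur)).2
      else (cs.foldl
          (fun (p : List Char × List Char) ch =>
            if ch == '.' then
              (if p.2.length > p.1.length then p.2 else p.1, [])
            else
              (p.1, p.2 ++ [ch])) (best, cur)).1) =
      (pvMapHead (cur ++ ·) (pvF cs)).foldl pvChooser best := by
  intro cs
  induction cs with
  | nil =>
    intro best cur
    simp [pvF, pvMapHead, pvChooser]
  | cons c cs ih =>
    intro best cur
    rw [List.foldl_cons]
    by_cases hc : c = '.'
    · subst hc
      simp only [beq_self_eq_true, if_true]
      rw [ih]
      cases hF : pvF cs with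
      | nil => exact absurd hF (pvF_ne_nil cs)
      | cons h t =>
        simp [pvF, hF, pvMapHead, pvChooser]
    · have hb : (c == '.') = false := by simp [hc]
      simp only [hb, Bool.false_eq_true, if_false]
      rw [ih]
      cases hF : pvF cs with
      | nil => exact absurd hF (pvF_ne_nil cs)
      | cons h t =>
        simp [pvF, hc, hF, pvMapHead, List.headI, List.append_assoc]

-- Python's max over the ofList'ed fragments is the pvChooser fold
theorem pv_max?_fold : ∀ (t : List (List Char)) (h : List Char),
    PySem.List.max? ((h :: t).map String.ofList) (fun s => (PySem.Str.len s : Int)) =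
      some (String.ofList (t.foldl pvChooser h)) := by
  have step : ∀ (m x : List Char),
      (if ((PySem.Str.len (String.ofList m) : Int) < (PySem.Str.len (String.ofList x) : Int)) then
        String.ofList x else String.ofList m) = String.ofList (pvChooser m x) := by
    intro m x
    simp only [PySem.Str.len, String.toList_ofList, pvChooser]
    by_cases hlt : m.length < x.length
    · rw [if_pos (by exact_mod_cast hlt), if_pos hlt]
    · rw [if_neg (by exact_mod_cast hlt), if_neg hlt]
  intro t
  induction t with
  | nil => intro h; simp [PySem.List.max?]
  | cons x xs ih =>
    intro h
    have e1 := ih (pvChooser h x)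
    simp only [PySem.List.max?, List.map_cons, List.foldl_cons] at e1 ⊢
    rw [← e1, ← apply_ite some, step h x]

-- flushing an empty best against the first fragment just keeps the first fragment
theorem pv_chooser_nil (h : List Char) : pvChooser [] h = h := by
  cases h <;> simp [pvChooser]

-- a dot-free char list has itself as its only fragment
theorem pvF_no_dot : ∀ (cs : List Char), '.' ∉ cs → pvF cs = [cs] := by
  intro cs
  induction cs with
  | nil => intro _; rfl
  | cons c cs ih =>
    intro hmem
    have hc : c ≠ '.' := fun h => hmem (h ▸ List.mem_cons_self)
    have := ih (fun h => hmem (List.mem_cons_of_mem _ h))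
    simp [pvF, hc, this, List.headI]

-- [a] is an infix iff a is a member
theorem pv_singleton_infix {a : Char} {l : List Char} : [a] <:+: l ↔ a ∈ l := by
  constructor
  · intro h
    exact (List.singleton_sublist).mp h.sublist
  · intro h
    obtain ⟨s, t, rfl⟩ := List.append_of_mem h
    exact ⟨s, t, by simp⟩

-- ===== A-side lemmas (dict dedup + stable reverse sort head = Python max) =====

theorem pv_max?_append_singleton (v : String → Int) (t : List String) (x : String) :
    PySem.List.max? (t ++ [x]) v =
      (match PySem.List.max? t v with
       | none => some x
       | some m => if v m < v x then some x else some m) := by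
  simp only [PySem.List.max?, List.foldl_append, List.foldl_cons, List.foldl_nil]
  split <;> rename_i heq <;> rw [heq]

theorem pv_max?_pair_append_singleton (t : List (String × Int)) (x : String × Int) :
    PySem.List.max? (t ++ [x]) (fun p => p.2) =
      (match PySem.List.max? t (fun p => p.2) with
       | none => some x
       | some m => if m.2 < x.2 then some x else some m) := by
  simp only [PySem.List.max?, List.foldl_append, List.foldl_cons, List.foldl_nil]
  split <;> rename_i heq <;> rw [heq]

theorem pv_head?_insertBy (x : String × Int) (acc : List (String × Int)) :
    (PySem.List.insertBy (fun a b => decide ((b.2 : Int) < a.2)) x acc).head? =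
      (match acc.head? with
       | none => some x
       | some m => if m.2 < x.2 then some x else some m) := by
  cases acc with
  | nil => simp [PySem.List.insertBy]
  | cons y ys =>
    simp only [PySem.List.insertBy, List.head?]
    by_cases h : (y.2 : Int) < x.2 <;> simp [h]

theorem pv_head?_foldl_insertBy :
    ∀ (xs : List (String × Int)) (acc : List (String × Int)),
      (xs.foldl (fun a x => PySem.List.insertBy (fun a b => decide ((b.2 : Int) < a.2)) x a) acc).head? =
        xs.foldl (fun o x =>
          match o with
          | none => some x
          | some m => if (m.2 : Int) < x.2 then some x else some m) acc.head?
  | [], _ => rfl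
  | x :: xs, acc => by
    simp only [List.foldl_cons]
    rw [pv_head?_foldl_insertBy xs, pv_head?_insertBy]

theorem pv_head_sorted_rev_eq_max? (xs : List (String × Int)) :
    (PySem.List.sorted xs (fun p => p.2) true).head? = PySem.List.max? xs (fun p => p.2) := by
  have h := pv_head?_foldl_insertBy xs []
  have e2 : PySem.List.max? xs (fun p => (p.2 : Int)) =
      List.foldl (fun o x =>
        match o with
        | none => some x
        | some m => if (m.2 : Int) < x.2 then some x else some m) none xs := by
    simp only [PySem.List.max?]
    congr 1
    funext o x
    cases o <;> rfl
  have e1 : PySem.List.sorted xs (fun p => (p.2 : Int)) true =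
      List.foldl (fun a x => PySem.List.insertBy (fun a b => decide ((b.2 : Int) < a.2)) x a) [] xs := rfl
  rw [e1, e2]
  exact h

theorem pv_max?_map_pair (v : String → Int) (xs : List String) :
    PySem.List.max? (xs.map (fun s => (s, v s))) (fun p => p.2) =
      (PySem.List.max? xs v).map (fun s => (s, v s)) := by
  induction xs using List.reverseRecOn with
  | nil => rfl
  | append_singleton t x ih =>
    rw [List.map_append, List.map_singleton, pv_max?_pair_append_singleton, ih,
        pv_max?_append_singleton]
    cases hm : PySem.List.max? t v with
    | none => rfl
    | some m => by_cases h : v m < v x <;> simp [h]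

theorem pv_max?_append_mem (v : String → Int) (s : List String) (x : String) (h : x ∈ s) :
    PySem.List.max? (s ++ [x]) v = PySem.List.max? s v := by
  rw [pv_max?_append_singleton]
  cases hm : PySem.List.max? s v with
  | none => exact absurd ((PySem.List.max?_eq_none_iff _ _).mp hm) (List.ne_nil_of_mem h)
  | some m => simp [not_lt.mpr (PySem.List.max?_isMax hm x h)]

theorem pv_max?_append_congr (v : String → Int) (a b : List String)
    (h : PySem.List.max? a v = PySem.List.max? b v) :
    ∀ t, PySem.List.max? (a ++ t) v = PySem.List.max? (b ++ t) v := by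
  intro t
  induction t using List.reverseRecOn with
  | nil => simpa using h
  | append_singleton t x ih =>
    rw [← List.append_assoc, ← List.append_assoc, pv_max?_append_singleton,
        pv_max?_append_singleton, ih]

theorem pv_max?_set (v : String → Int) :
    ∀ (xs s : List String),
      PySem.List.max? (xs.foldl PySem.Set.add s) v = PySem.List.max? (s ++ xs) v
  | [], s => by simp
  | x :: xs, s => by
    simp only [List.foldl_cons]
    rw [pv_max?_set v xs (PySem.Set.add s x),
        show s ++ x :: xs = (s ++ [x]) ++ xs by simp]
    by_cases h : x ∈ s
    · rw [show PySem.Set.add s x = s by simp [PySem.Set.add, h]]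
      exact pv_max?_append_congr v s (s ++ [x]) (pv_max?_append_mem v s x h).symm xs
    · rw [show PySem.Set.add s x = s ++ [x] by simp [PySem.Set.add, h]]

theorem pv_max?_ofList (v : String → Int) (xs : List String) :
    PySem.List.max? (PySem.Set.ofList xs) v = PySem.List.max? xs v := by
  rw [PySem.Set.ofList_eq_foldl, pv_max?_set v xs []]
  rfl

theorem pv_dict_fold (v : String → Int) :
    ∀ (xs s : List String),
      xs.foldl (fun d smi => d.insert smi (v smi)) (PySem.Dict.mk (s.map (fun k => (k, v k)))) =
        PySem.Dict.mk ((xs.foldl PySem.Set.add s).map (fun k => (k, v k)))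
  | [], _ => rfl
  | x :: xs, s => by
    simp only [List.foldl_cons]
    have hc : (PySem.Dict.mk (s.map (fun k => (k, v k)))).contains x = true ↔ x ∈ s := by
      rw [PySem.Dict.contains_mk]
      simp
    by_cases h : x ∈ s
    · have h1 : (PySem.Dict.mk (s.map (fun k => (k, v k)))).insert x (v x) =
          PySem.Dict.mk (s.map (fun k => (k, v k))) := by
        apply PySem.Dict.ext
        rw [PySem.Dict.items_insert_of_contains _ _ (hc.mpr h)]
        simp only [List.map_map]
        apply List.map_congr_left
        intro k _
        by_cases hk : k = x <;> simp [Function.comp, hk]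
      rw [h1, show PySem.Set.add s x = s by simp [PySem.Set.add, h]]
      exact pv_dict_fold v xs s
    · have h1 : (PySem.Dict.mk (s.map (fun k => (k, v k)))).insert x (v x) =
          PySem.Dict.mk ((s ++ [x]).map (fun k => (k, v k))) := by
        apply PySem.Dict.ext
        rw [PySem.Dict.items_insert_of_not_contains _ _
              (by rw [Bool.eq_false_iff]; intro hcc; exact h (hc.mp hcc))]
        simp
      rw [h1, show PySem.Set.add s x = s ++ [x] by simp [PySem.Set.add, h]]
      exact pv_dict_fold v xs (s ++ [x])

-- A's sorted(dict)[0][0] computation agrees with Python's max(key=len) over the fragments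
theorem pv_biggest_eq (xs : List String) :
    (match PySem.List.sorted
        ((xs.foldl (fun d smi => d.insert smi (PySem.Str.len smi : Int)) PySem.Dict.empty).items)
        (fun x => x.2) true with
      | [] => ""
      | p :: _ => p.1) =
      (match PySem.List.max? xs (fun s => (PySem.Str.len s : Int)) with
       | some m => m
       | none => "") := by
  have hd : (xs.foldl (fun d smi => d.insert smi (PySem.Str.len smi : Int)) PySem.Dict.empty).items =
      (PySem.Set.ofList xs).map (fun k => (k, (PySem.Str.len k : Int))) := by
    have h := pv_dict_fold (fun s => (PySem.Str.len s : Int)) xs []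
    simp only [List.map_nil] at h
    rw [show (PySem.Dict.empty : PySem.Dict String Int) = PySem.Dict.mk [] from rfl, h,
        PySem.Set.ofList_eq_foldl]
  have hh : (PySem.List.sorted
      ((xs.foldl (fun d smi => d.insert smi (PySem.Str.len smi : Int)) PySem.Dict.empty).items)
      (fun x => x.2) true).head? =
      (PySem.List.max? xs (fun s => (PySem.Str.len s : Int))).map
        (fun s => (s, (PySem.Str.len s : Int))) := by
    rw [pv_head_sorted_rev_eq_max?, hd, pv_max?_map_pair, pv_max?_ofList]
  cases hm : PySem.List.max? xs (fun s => (PySem.Str.len s : Int)) with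
  | none =>
    rw [hm] at hh
    simp only [Option.map_none, List.head?_eq_none_iff] at hh
    rw [hh]
  | some m =>
    rw [hm] at hh
    simp only [Option.map_some] at hh
    cases hs : PySem.List.sorted
        ((xs.foldl (fun d smi => d.insert smi (PySem.Str.len smi : Int)) PySem.Dict.empty).items)
        (fun x => x.2) true with
    | nil => rw [hs] at hh; simp at hh
    | cons p t =>
      rw [hs] at hh
      simp only [List.head?_cons, Option.some.injEq] at hh
      simp [hh]

-- the two chosen strings coincide
theorem pv_biggest_agree (smiles : String) :
    (if PySem.Str.isIn "." smiles then
      (match PySem.List.sorted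
          ((((PySem.Str.split? smiles ".").getD []).foldl
              (fun d smi => d.insert smi (PySem.Str.len smi : Int)) PySem.Dict.empty).items)
          (fun x => x.2) true with
        | [] => ""
        | p :: _ => p.1)
    else smiles) =
      String.ofList ((pvF smiles.toList).foldl pvChooser []) := by
  by_cases hin : PySem.Str.isIn "." smiles = true
  · rw [if_pos hin, pv_biggest_eq, pv_split?_dot]
    cases hF : pvF smiles.toList with
    | nil => exact absurd hF (pvF_ne_nil _)
    | cons h t =>
      rw [Option.getD_some, pv_max?_fold t h]
      simp [pv_chooser_nil]
  · rw [if_neg hin]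
    have hnd : '.' ∉ smiles.toList := by
      intro hmem
      apply hin
      rw [PySem.Str.isIn_iff_infix]
      exact pv_singleton_infix.mpr (by simpa using hmem)
    rw [pvF_no_dot _ hnd]
    simp [pv_chooser_nil]

-- ===== VERDICT (by name: the statement is the Claim_ definition above) =====
theorem choose_biggest_smiles_spec : Claim_equal_choose_biggest_smiles := by
  intro smiles smiles_list _
  unfold Spec_choose_biggest_smiles
  simp only [choose_biggest_smiles, choose_biggest_smiles_alt]
  rw [pv_scan smiles.toList [] []]
  have hmap : pvMapHead (([] : List Char) ++ ·) (pvF smiles.toList) = pvF smiles.toList := by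
    cases hF : pvF smiles.toList with
    | nil => rfl
    | cons h t => simp [pvMapHead]
  rw [hmap]
  rw [← pv_biggest_agree smiles]
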